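-- pv_equiv track=rewrite | github.com/yashchavan772/final_trinerlayer_code | TrinetLayerCode/Trinet/Trinet-Layer/js_analyzer/utils/validators.py | validate_jwt_format
-- ===== SOURCE A (Python) =====
-- def validate_jwt_format(value: str) -> bool:
--     """Validate JWT token format strictly."""
--     if not value:
--         return False
--
--     parts = value.split('.')
--     if len(parts) != 3:
--         return False
--
--     if not all(len(p) >= 10 for p in parts):
--         return False
--
--     if not value.startswith('eyJ'):
--         return False
--
--     return True
-- ===== SOURCE B (Python) =====
-- def validate_jwt_format(value: str) -> bool:
--     """Validate JWT token format strictly (single pass, no split)."""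
--     if not value.startswith('eyJ'):
--         return False
--     lens = [0]
--     for ch in value:
--         if ch == '.':
--             lens.append(0)
--         else:
--             lens[-1] += 1
--     return len(lens) == 3 and all(l >= 10 for l in lens)
-- ===== Notes on version B (the rewrite author's own statement) =====
-- stated objective: simpler
-- what changed: Replaced the emptiness check plus str.split and the all() pass over parts with a single character scan that maintains the running segment lengths in a small state machine, then checks the three constraints once.
import Mathlib
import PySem

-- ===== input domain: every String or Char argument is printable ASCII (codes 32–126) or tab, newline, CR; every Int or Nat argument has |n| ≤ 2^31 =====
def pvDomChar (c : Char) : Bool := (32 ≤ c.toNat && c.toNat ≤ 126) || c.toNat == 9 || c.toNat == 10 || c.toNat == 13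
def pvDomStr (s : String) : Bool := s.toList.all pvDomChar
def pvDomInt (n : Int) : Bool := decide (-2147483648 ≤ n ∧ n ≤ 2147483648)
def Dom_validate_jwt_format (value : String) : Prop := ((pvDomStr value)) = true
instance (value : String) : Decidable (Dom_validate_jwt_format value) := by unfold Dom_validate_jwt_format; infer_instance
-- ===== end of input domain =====

-- B replaces str.split with a single character pass that accumulates segment lengths (simpler one-pass state machine; same cost class).


-- ===== PORT A =====
-- literal port of A: empty check, split on '.', 3 parts, each length ≥ 10, startswith 'eyJ'
def validate_jwt_format (value : String) : Bool :=
  if value.toList = [] then false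
  else
    let parts := PySem.Chars.splitOn value.toList ['.']
    if parts.length ≠ 3 then false
    else if !(parts.all fun p => decide (10 ≤ p.length)) then false
    else if !(PySem.Str.startswith value "eyJ") then false
    else true

-- ===== PORT B =====
-- one fold over the characters maintaining (current segment length, finished segment lengths, reversed)
def jwtStep (st : Nat × List Nat) (ch : Char) : Nat × List Nat :=
  if ch = '.' then (0, st.1 :: st.2) else (st.1 + 1, st.2)

def validate_jwt_format_alt (value : String) : Bool :=
  if !(PySem.Str.startswith value "eyJ") then false
  else
    let st := value.toList.foldl jwtStep (0, [])
    let lens := (st.1 :: st.2).reverse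
    decide (lens.length = 3) && lens.all (fun l => decide (10 ≤ l))

-- ===== PRECONDITION & SPEC =====
def Spec_validate_jwt_format (value : String) (out : Bool) : Prop := out = validate_jwt_format_alt value
instance (value : String) (out : Bool) : Decidable (Spec_validate_jwt_format value out) := by unfold Spec_validate_jwt_format; infer_instance

-- ===== CLAIM (what is proved, stated in full; the proofs are below) =====
def Claim_equal_validate_jwt_format : Prop := ∀ (value : String), Dom_validate_jwt_format value → Spec_validate_jwt_format value (validate_jwt_format value)

-- ===== LEMMAS AND PROOFS =====

-- reference segmentation of a char list on '.', by plain structural recursion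
def jwtSegs (cur : List Char) : List Char → List (List Char)
  | [] => [cur.reverse]
  | c :: rest => if c = '.' then cur.reverse :: jwtSegs [] rest else jwtSegs (c :: cur) rest

theorem splitOn_go_eq_segs : ∀ (fuel : Nat) (l cur : List Char) (acc : List (List Char)),
    l.length < fuel →
    PySem.Chars.splitOn.go ['.'] fuel l cur acc = acc.reverse ++ jwtSegs cur l := by
  intro fuel
  induction fuel with
  | zero => intro l cur acc h; omega
  | succ n ih =>
    intro l cur acc h
    cases l with
    | nil => simp [PySem.Chars.splitOn.go, jwtSegs]
    | cons c rest =>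
      by_cases hc : c = '.'
      · subst hc
        rw [show PySem.Chars.splitOn.go ['.'] (n+1) ('.' :: rest) cur acc
              = PySem.Chars.splitOn.go ['.'] n rest [] (cur.reverse :: acc) by
            simp [PySem.Chars.splitOn.go, List.isPrefixOf]]
        rw [ih rest [] (cur.reverse :: acc) (by simpa using Nat.lt_of_succ_lt_succ h)]
        simp [jwtSegs]
      · rw [show PySem.Chars.splitOn.go ['.'] (n+1) (c :: rest) cur acc
              = PySem.Chars.splitOn.go ['.'] n rest (c :: cur) acc by
            have hp : (['.'] : List Char).isPrefixOf (c :: rest) = false := by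
              simp [List.isPrefixOf]
              exact fun h => absurd h.symm hc
            simp [PySem.Chars.splitOn.go, hp]]
        rw [ih rest (c :: cur) acc (by simpa using Nat.lt_of_succ_lt_succ h)]
        simp [jwtSegs, hc]

theorem splitOn_eq_segs (l : List Char) :
    PySem.Chars.splitOn l ['.'] = jwtSegs [] l := by
  unfold PySem.Chars.splitOn
  rw [splitOn_go_eq_segs (l.length + 1) l [] [] (by omega)]
  simp

theorem foldl_jwtStep_eq_segs_lengths : ∀ (l cur : List Char) (done : List Nat),
    ((List.foldl jwtStep (cur.length, done) l).1 :: (List.foldl jwtStep (cur.length, done) l).2).reverse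
      = done.reverse ++ (jwtSegs cur l).map List.length := by
  intro l
  induction l with
  | nil => intro cur done; simp [jwtSegs]
  | cons c rest ih =>
    intro cur done
    by_cases hc : c = '.'
    · subst hc
      have := ih [] (cur.length :: done)
      simp only [List.foldl_cons, jwtStep] at *
      simpa [jwtSegs] using this
    · have := ih (c :: cur) done
      simp only [List.foldl_cons, jwtStep, if_neg hc] at *
      simpa [jwtSegs, hc] using this

theorem lens_eq (l : List Char) :
    ((List.foldl jwtStep (0, []) l).1 :: (List.foldl jwtStep (0, []) l).2).reverse
      = (PySem.Chars.splitOn l ['.']).map List.length := by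
  rw [splitOn_eq_segs]
  simpa using foldl_jwtStep_eq_segs_lengths l [] []

-- ===== VERDICT (by name: the statement is the Claim_ definition above) =====
theorem validate_jwt_format_spec : Claim_equal_validate_jwt_format := by
  intro value _
  unfold Spec_validate_jwt_format validate_jwt_format validate_jwt_format_alt
  have hlens := lens_eq value.toList
  by_cases hsw : PySem.Str.startswith value "eyJ" = true
  · -- startswith holds; value is nonempty
    have hne : value.toList ≠ [] := by
      intro h
      have h2 := hsw
      rw [PySem.Str.startswith_eq, h] at h2
      exact absurd ((PySem.Chars.startswith_iff _ _).mp h2) (by simp)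
    rw [if_neg hne, hsw]
    simp only [Bool.not_true, Bool.false_eq_true, if_false]
    rw [hlens]
    simp only [List.length_map, List.all_map, Function.comp_def]
    by_cases h3 : (PySem.Chars.splitOn value.toList ['.']).length = 3
    · by_cases hall : (PySem.Chars.splitOn value.toList ['.']).all (fun p => decide (10 ≤ p.length)) = true
      · simp [h3, hall]
      · simp [h3, hall]
    · simp [h3]
  · -- startswith fails: both sides false
    rw [Bool.not_eq_true] at hsw
    rw [hsw]
    simp only [Bool.not_false, if_true]
    split
    · rfl
    next =>
      split
      · rfl
      · split
        · rfl
        · simp_all
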